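-- pv_equiv track=rewrite | github.com/rackerlabs/poundcake | api/services/repo_sync_service.py | _normalize_promql_expr_for_compare
-- ===== SOURCE A (Python) =====
-- def _normalize_promql_expr_for_compare(value: str) -> str:
--     """Normalize PromQL whitespace outside quoted strings for semantic comparisons."""
--     result: list[str] = []
--     quote: str | None = None
--     escaped = False
--     pending_space = False
--     idx = 0
--
--     while idx < len(value):
--         char = value[idx]
--
--         if quote is None and char == "#":
--             while idx < len(value) and value[idx] not in "\r\n":
--                 idx += 1
--             pending_space = True
--             continue
--
--         if quote is None and char.isspace():
--             pending_space = True
--             idx += 1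
--             continue
--
--         if quote is None and char in {'"', "'", "`"}:
--             if pending_space and result:
--                 result.append(" ")
--             pending_space = False
--             quote = char
--             escaped = False
--             result.append(char)
--             idx += 1
--             continue
--
--         if quote is not None:
--             result.append(char)
--             if quote != "`" and char == "\\" and not escaped:
--                 escaped = True
--             elif char == quote and not escaped:
--                 quote = None
--                 escaped = False
--             else:
--                 escaped = False
--             idx += 1
--             continue
--
--         if pending_space and result:
--             result.append(" ")
--         pending_space = False
--         result.append(char)
--         idx += 1
--
--     return "".join(result).strip()
-- ===== SOURCE B (Python) =====
-- import re
--
-- _TOKEN = re.compile(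
--     r'#[^\r\n]*'                    # comment (to end of line)
--     r'|"(?:\\[\s\S]|[^"\\])*"?'     # double-quoted string, optional closing quote
--     r"|'(?:\\[\s\S]|[^'\\])*'?"     # single-quoted string, optional closing quote
--     r'|`[^`]*`?'                    # backtick string (no escapes)
--     r'|\s'                          # one whitespace character
--     r'|[\s\S]'                      # any other single character
-- )
--
-- def _normalize_promql_expr_for_compare(value: str) -> str:
--     out: list[str] = []
--     pending_space = False
--     for m in _TOKEN.finditer(value):
--         tok = m.group()
--         if tok[0] == '#' or tok.isspace():
--             pending_space = True
--             continue
--         if pending_space and out: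
--             out.append(' ')
--         pending_space = False
--         out.append(tok)
--     return ''.join(out).strip()
-- ===== Notes on version B (the rewrite author's own statement) =====
-- stated objective: alternative
-- what changed: Replaced A's char-by-char state machine (quote/escaped/pending flags updated per character) with a regex tokenizer that matches whole tokens (comment, quoted string with escapes, whitespace, single char) and a pending-space fold over the token stream.
import Mathlib
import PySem

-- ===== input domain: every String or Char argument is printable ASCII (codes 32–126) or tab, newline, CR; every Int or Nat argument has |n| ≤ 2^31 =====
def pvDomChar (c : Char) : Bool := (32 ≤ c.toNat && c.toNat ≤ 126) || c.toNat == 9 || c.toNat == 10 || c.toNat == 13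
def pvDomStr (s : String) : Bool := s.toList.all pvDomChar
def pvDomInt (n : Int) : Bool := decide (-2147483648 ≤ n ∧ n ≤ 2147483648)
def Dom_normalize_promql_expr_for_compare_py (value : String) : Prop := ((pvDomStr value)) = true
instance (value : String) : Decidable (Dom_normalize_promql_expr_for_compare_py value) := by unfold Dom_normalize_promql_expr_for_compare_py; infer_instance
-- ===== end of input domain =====

-- B replaces A's char-by-char state machine with a tokenizer (comment / quoted string /
-- whitespace / any single char, Source B's regex alternation) followed by a pending-space fold
-- over whole tokens (objective: alternative decomposition, same asymptotic cost).

-- ===== PORT A =====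
-- the inner `while idx < len(value) and value[idx] not in "\r\n": idx += 1` of A
def pvASkipComment : List Char → List Char
  | [] => []
  | c :: rest => if c = '\r' ∨ c = '\n' then c :: rest else pvASkipComment rest

-- needed by pvALoop's termination proof
theorem pvASkipComment_length_le : ∀ cs : List Char, (pvASkipComment cs).length ≤ cs.length
  | [] => le_refl _
  | c :: rest => by
      simp only [pvASkipComment]
      split
      · exact le_refl _
      · exact le_trans (pvASkipComment_length_le rest) (Nat.le_succ _)

-- A's main `while idx < len(value)` loop; state = (quote, escaped, pending_space, result)
def pvALoop (cs : List Char) (quote : Option Char) (escaped pending : Bool)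
    (result : List Char) : List Char :=
  match cs with
  | [] => result
  | char :: rest =>
    match quote with
    | none =>
      if char = '#' then
        pvALoop (pvASkipComment rest) none escaped true result
      else if PySem.Chars.isspace char then
        pvALoop rest none escaped true result
      else if char = '"' ∨ char = '\'' ∨ char = '`' then
        let result := if pending ∧ result ≠ [] then result ++ [' '] else result
        pvALoop rest (some char) false false (result ++ [char])
      else
        let result := if pending ∧ result ≠ [] then result ++ [' '] else result
        pvALoop rest none escaped false (result ++ [char])
    | some q =>
      let result := result ++ [char]
      if q ≠ '`' ∧ char = '\\' ∧ escaped = false then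
        pvALoop rest (some q) true pending result
      else if char = q ∧ escaped = false then
        pvALoop rest none false pending result
      else
        pvALoop rest (some q) false pending result
termination_by cs.length
decreasing_by
  · exact Nat.lt_succ_of_le (pvASkipComment_length_le rest)
  all_goals simp

def normalize_promql_expr_for_compare_py (value : String) : String :=
  String.ofList (PySem.Chars.strip (pvALoop value.toList none false false []))

-- ===== PORT B =====
-- hand-written tokenizer implementing exactly Source B's regex alternation (PySem has no regex).
-- pvBStr q cs: the body that `(?:\\[\s\S]|[^q\\])*q?` (for q = ` just `[^`]*`?`) matches at
-- the start of cs, plus the unconsumed rest; exact for these patterns.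
def pvBStr (q : Char) : List Char → (List Char × List Char)
  | [] => ([], [])
  | c :: rest =>
    if q ≠ '`' ∧ c = '\\' then
      match rest with
      | [] => ([], c :: rest)
      | c2 :: rest2 =>
        let p := pvBStr q rest2
        (c :: c2 :: p.1, p.2)
    else if c = q then ([c], rest)
    else
      let p := pvBStr q rest
      (c :: p.1, p.2)

-- needed by pvBTokens's termination proof
theorem pvBStr_length_le : ∀ (q : Char) (cs : List Char), (pvBStr q cs).2.length ≤ cs.length
  | _, [] => le_refl _
  | q, c :: [] => by
      simp only [pvBStr]
      split
      · simp
      · split <;> simp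
  | q, c :: c2 :: rest2 => by
      simp only [pvBStr]
      split
      · have := pvBStr_length_le q rest2
        simp only [List.length_cons]
        omega
      · split
        · simp
        · have := pvBStr_length_le q (c2 :: rest2)
          simp only [List.length_cons] at *
          omega

-- the token stream of Source B's _TOKEN.finditer, in the same priority order
def pvBTokens : List Char → List (List Char)
  | [] => []
  | c :: rest =>
    if c = '#' then
      (c :: rest.takeWhile (fun x => !(x = '\r' ∨ x = '\n'))) ::
        pvBTokens (rest.dropWhile (fun x => !(x = '\r' ∨ x = '\n')))
    else if c = '"' ∨ c = '\'' ∨ c = '`' then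
      let p := pvBStr c rest
      (c :: p.1) :: pvBTokens p.2
    else
      [c] :: pvBTokens rest
termination_by cs => cs.length
decreasing_by
  · exact Nat.lt_succ_of_le (List.length_dropWhile_le _ _)
  · exact Nat.lt_succ_of_le (pvBStr_length_le c rest)
  · simp

-- Source B's loop body over one token
def pvBStep (st : List (List Char) × Bool) (tok : List Char) : List (List Char) × Bool :=
  if tok.head? = some '#' ∨ PySem.Chars.strIsspace tok then
    (st.1, true)
  else
    ((if st.2 ∧ st.1 ≠ [] then st.1 ++ [[' ']] else st.1) ++ [tok], false)

def normalize_promql_expr_for_compare_py_alt (value : String) : String :=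
  String.ofList (PySem.Chars.strip
    (((pvBTokens value.toList).foldl pvBStep ([], false)).1.flatten))

-- ===== PRECONDITION & SPEC =====
def Spec_normalize_promql_expr_for_compare_py (value : String) (out : String) : Prop := out = normalize_promql_expr_for_compare_py_alt value
instance (value : String) (out : String) : Decidable (Spec_normalize_promql_expr_for_compare_py value out) := by unfold Spec_normalize_promql_expr_for_compare_py; infer_instance

-- ===== CLAIM (what is proved, stated in full; the proofs are below) =====
def Claim_equal_normalize_promql_expr_for_compare_py : Prop := ∀ (value : String), Dom_normalize_promql_expr_for_compare_py value → Spec_normalize_promql_expr_for_compare_py value (normalize_promql_expr_for_compare_py value)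

-- ===== LEMMAS AND PROOFS =====

theorem pvASkipComment_eq_dropWhile : ∀ cs : List Char,
    pvASkipComment cs = cs.dropWhile (fun x => !(x = '\r' ∨ x = '\n'))
  | [] => rfl
  | c :: rest => by
      simp only [pvASkipComment, List.dropWhile]
      by_cases h : c = '\r' ∨ c = '\n'
      · simp [h]
      · simp [h, pvASkipComment_eq_dropWhile rest]

-- a token list accumulator with no empty member has an empty flattening iff it is empty
theorem pvFlatten_ne_nil {accB : List (List Char)} (hne : [] ∉ accB) :
    accB.flatten ≠ [] ↔ accB ≠ [] := by
  cases accB with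
  | nil => simp
  | cons t ts =>
      simp only [List.flatten_cons, ne_eq, List.cons_ne_nil, not_false_iff, iff_true]
      have ht : t ≠ [] := by intro h; exact hne (by simp [h])
      simp [List.append_eq_nil_iff]
      intro h; exact absurd h ht

-- string sub-lemma: A's in-string processing from (quote = q, escaped = false) appends exactly
-- the token body pvBStr computes and returns to quote = none at pvBStr's rest
theorem pvStrLemmaAux : ∀ (n : Nat) (cs : List Char), cs.length ≤ n →
    ∀ (q : Char) (result : List Char),
    pvALoop cs (some q) false false result =
      pvALoop (pvBStr q cs).2 none false false (result ++ (pvBStr q cs).1) := by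
  intro n
  induction n with
  | zero =>
      intro cs hcs q result
      have hnil : cs = [] := List.eq_nil_of_length_eq_zero (Nat.le_zero.mp hcs)
      subst hnil; simp [pvALoop, pvBStr]
  | succ n ih =>
      intro cs hcs q result
      match cs with
      | [] => simp [pvALoop, pvBStr]
      | c :: rest =>
        by_cases h1 : q ≠ '`' ∧ c = '\\'
        · obtain ⟨hq, hc⟩ := h1
          subst hc
          match rest with
          | [] =>
              simp [pvALoop, pvBStr, hq, show PySem.Chars.isspace '\\' = false from by decide]
          | c2 :: rest2 =>
              have hlen : rest2.length ≤ n := by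
                simp only [List.length_cons] at hcs; omega
              have e1 : pvALoop ('\\' :: c2 :: rest2) (some q) false false result
                  = pvALoop rest2 (some q) false false (result ++ ['\\', c2]) := by
                rw [pvALoop]
                simp only [hq, ne_eq, not_false_eq_true, and_true, if_true]
                rw [pvALoop]
                simp
              rw [e1, ih rest2 hlen q]
              conv_rhs => rw [pvBStr.eq_def]
              simp [hq]
        · by_cases h2 : c = q
          · subst h2
            conv_rhs => rw [pvBStr.eq_def]
            simp [pvALoop, h1]
          · have hlen : rest.length ≤ n := by
              simp only [List.length_cons] at hcs; omega
            have e1 : pvALoop (c :: rest) (some q) false false result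
                = pvALoop rest (some q) false false (result ++ [c]) := by
              simp [pvALoop, h1, h2]
            rw [e1, ih rest hlen q]
            conv_rhs => rw [pvBStr.eq_def]
            simp [h1, h2]

-- main invariant: A's loop in its neutral state equals B's fold over the token stream,
-- given matching accumulators (A's char list = flattening of B's token list)
theorem pvMain : ∀ (n : Nat) (cs : List Char), cs.length ≤ n →
    ∀ (p : Bool) (accA : List Char) (accB : List (List Char)),
      accA = accB.flatten → [] ∉ accB →
      pvALoop cs none false p accA = ((pvBTokens cs).foldl pvBStep (accB, p)).1.flatten := by
  intro n
  induction n with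
  | zero =>
      intro cs hcs p accA accB hAB hne
      have hnil : cs = [] := List.eq_nil_of_length_eq_zero (Nat.le_zero.mp hcs)
      subst hnil; simpa [pvALoop, pvBTokens] using hAB
  | succ n ih =>
      intro cs hcs p accA accB hAB hne
      match cs with
      | [] => simpa [pvALoop, pvBTokens] using hAB
      | c :: rest =>
        have hcs' : rest.length ≤ n := by
          simp only [List.length_cons] at hcs; omega
        have hiff : accA ≠ [] ↔ accB ≠ [] := hAB ▸ pvFlatten_ne_nil hne
        by_cases hsh : c = '#'
        · subst hsh
          have e1 : pvALoop ('#' :: rest) none false p accA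
              = pvALoop (pvASkipComment rest) none false true accA := by
            simp [pvALoop]
          have e2 : pvBTokens ('#' :: rest)
              = ('#' :: rest.takeWhile (fun x => !(x = '\r' ∨ x = '\n'))) ::
                  pvBTokens (rest.dropWhile (fun x => !(x = '\r' ∨ x = '\n'))) := by
            conv_lhs => rw [pvBTokens.eq_def]
            simp
          rw [e1, e2, List.foldl_cons]
          rw [show pvBStep (accB, p) ('#' :: List.takeWhile (fun x => !(x = '\r' ∨ x = '\n')) rest) = (accB, true) from by
            simp [pvBStep]]
          rw [pvASkipComment_eq_dropWhile]
          exact ih _ (le_trans (List.length_dropWhile_le _ _) hcs') true accA accB hAB hne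
        · by_cases hsp : PySem.Chars.isspace c = true
          · have hq : ¬ (c = '"' ∨ c = '\'' ∨ c = '`') := by
              rintro (rfl | rfl | rfl) <;> exact absurd hsp (by decide)
            have e1 : pvALoop (c :: rest) none false p accA
                = pvALoop rest none false true accA := by
              simp [pvALoop, hsh, hsp]
            have e2 : pvBTokens (c :: rest) = [c] :: pvBTokens rest := by
              conv_lhs => rw [pvBTokens.eq_def]
              simp [hsh, hq]
            rw [e1, e2, List.foldl_cons]
            rw [show pvBStep (accB, p) [c] = (accB, true) from by
              simp [pvBStep, PySem.Chars.strIsspace, hsp, hsh]]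
            exact ih rest hcs' true accA accB hAB hne
          · have hstep : ∀ t : List Char, t.head? = some c →
                pvBStep (accB, p) t =
                  ((if p ∧ accB ≠ [] then accB ++ [[' ']] else accB) ++ [t], false) := by
              intro t ht
              match t, ht with
              | c0 :: t', ht =>
                simp only [List.head?_cons, Option.some.injEq] at ht
                subst ht
                rw [pvBStep]
                rw [if_neg (by simp [PySem.Chars.strIsspace, hsp, hsh])]
            have hcond : (p ∧ accA ≠ []) ↔ (p ∧ accB ≠ []) := and_congr_right fun _ => hiff
            by_cases hq : c = '"' ∨ c = '\'' ∨ c = '`'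
            · have e1 : pvALoop (c :: rest) none false p accA
                  = pvALoop rest (some c) false false
                      ((if p ∧ accA ≠ [] then accA ++ [' '] else accA) ++ [c]) := by
                rw [pvALoop]
                rw [if_neg hsh, if_neg hsp, if_pos hq]
              have e2 : pvBTokens (c :: rest) = (c :: (pvBStr c rest).1) :: pvBTokens (pvBStr c rest).2 := by
                conv_lhs => rw [pvBTokens.eq_def]
                simp [hsh, hq]
              rw [e1, e2, List.foldl_cons]
              rw [hstep (c :: (pvBStr c rest).1) rfl]
              rw [pvStrLemmaAux rest.length rest (le_refl _) c]
              have hA' : (if p ∧ accA ≠ [] then accA ++ [' '] else accA) ++ [c] ++ (pvBStr c rest).1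
                  = ((if p ∧ accB ≠ [] then accB ++ [[' ']] else accB) ++ [c :: (pvBStr c rest).1]).flatten := by
                by_cases hp : p ∧ accB ≠ []
                · rw [if_pos (hcond.mpr hp), if_pos hp]
                  simp [hAB]
                · rw [if_neg (fun h => hp (hcond.mp h)), if_neg hp]
                  simp [hAB]
              have hne' : [] ∉ (if p ∧ accB ≠ [] then accB ++ [[' ']] else accB) ++ [c :: (pvBStr c rest).1] := by
                by_cases hp : p ∧ accB ≠ [] <;> simp [hp, hne]
              have := ih (pvBStr c rest).2 (le_trans (pvBStr_length_le c rest) hcs') false _ _ hA' hne'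
              simpa using this
            · have e1 : pvALoop (c :: rest) none false p accA
                  = pvALoop rest none false false
                      ((if p ∧ accA ≠ [] then accA ++ [' '] else accA) ++ [c]) := by
                rw [pvALoop]
                rw [if_neg hsh, if_neg hsp, if_neg hq]
              have e2 : pvBTokens (c :: rest) = [c] :: pvBTokens rest := by
                conv_lhs => rw [pvBTokens.eq_def]
                simp [hsh, hq]
              rw [e1, e2, List.foldl_cons]
              rw [hstep [c] rfl]
              have hA' : (if p ∧ accA ≠ [] then accA ++ [' '] else accA) ++ [c]
                  = ((if p ∧ accB ≠ [] then accB ++ [[' ']] else accB) ++ [[c]]).flatten := by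
                by_cases hp : p ∧ accB ≠ []
                · rw [if_pos (hcond.mpr hp), if_pos hp]
                  simp [hAB]
                · rw [if_neg (fun h => hp (hcond.mp h)), if_neg hp]
                  simp [hAB]
              have hne' : [] ∉ (if p ∧ accB ≠ [] then accB ++ [[' ']] else accB) ++ [[c]] := by
                by_cases hp : p ∧ accB ≠ [] <;> simp [hp, hne]
              exact ih rest hcs' false _ _ hA' hne'

-- ===== VERDICT (by name: the statement is the Claim_ definition above) =====
theorem normalize_promql_expr_for_compare_py_spec : Claim_equal_normalize_promql_expr_for_compare_py := by
  intro value _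
  unfold Spec_normalize_promql_expr_for_compare_py
  unfold normalize_promql_expr_for_compare_py normalize_promql_expr_for_compare_py_alt
  rw [pvMain value.toList.length value.toList (le_refl _) false [] [] rfl (by simp)]
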